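-- pv_equiv track=rewrite | github.com/0Chord/algorithm | JadenCase 문자열 만들기.py | solution
-- ===== SOURCE A (Python) =====
-- def solution(s):
--     arr = s.split(" ")
--     for idx in range(len(arr)):
--         arr[idx] = list(arr[idx])
--         for i in range(len(arr[idx])):
--             if i == 0:
--                 first = ord(arr[idx][0])
--                 if 97 <= first <= 122:
--                     arr[idx][i] = chr(first-32)
--             else:
--                 if 65<=ord(arr[idx][i])<=90:
--                     arr[idx][i] = chr(ord(arr[idx][i])+32)
--         arr[idx] = "".join(arr[idx])
--     arr = " ".join(arr)
--     return arr
-- ===== SOURCE B (Python) =====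
-- def solution(s):
--     out = []
--     prev = ' '
--     for c in s:
--         o = ord(c)
--         if prev == ' ':
--             out.append(chr(o - 32) if 97 <= o <= 122 else c)
--         else:
--             out.append(chr(o + 32) if 65 <= o <= 90 else c)
--         prev = c
--     return "".join(out)
-- ===== Notes on version B (the rewrite author's own statement) =====
-- stated objective: idiomatic
-- what changed: Replaces split-into-words plus a nested per-word index loop and two joins by one flat left-to-right scan that detects word starts via the previous character being a space.
import Mathlib
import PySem

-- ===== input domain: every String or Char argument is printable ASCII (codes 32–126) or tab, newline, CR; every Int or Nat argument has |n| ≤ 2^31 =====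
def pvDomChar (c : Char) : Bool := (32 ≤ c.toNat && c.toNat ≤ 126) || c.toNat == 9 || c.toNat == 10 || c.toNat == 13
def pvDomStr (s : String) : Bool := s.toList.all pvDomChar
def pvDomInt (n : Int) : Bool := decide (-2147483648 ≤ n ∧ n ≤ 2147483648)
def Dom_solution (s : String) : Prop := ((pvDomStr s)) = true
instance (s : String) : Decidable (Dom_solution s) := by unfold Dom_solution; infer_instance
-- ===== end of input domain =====

-- B replaces A's split-into-words + nested per-word loop + joins by one flat
-- boundary-aware scan (previous char == ' ' marks a word start).


-- ===== PORT A =====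
-- per-word inner loop of A: for i in range(len(w)): if i == 0 … else …
def capWordA (w : List Char) : List Char :=
  w.mapIdx (fun i c =>
    if i = 0 then
      if 97 ≤ c.toNat ∧ c.toNat ≤ 122 then Char.ofNat (c.toNat - 32) else c
    else
      if 65 ≤ c.toNat ∧ c.toNat ≤ 90 then Char.ofNat (c.toNat + 32) else c)

def solution (s : String) : String :=
  String.ofList (PySem.Chars.join [' '] ((PySem.Chars.splitOn s.toList [' ']).map capWordA))

-- ===== PORT B =====
-- Source B's single loop, carrying the previous character (initially ' ')
def jadenGo (prev : Char) : List Char → List Char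
  | [] => []
  | c :: rest =>
    (if prev = ' ' then
       (if 97 ≤ c.toNat ∧ c.toNat ≤ 122 then Char.ofNat (c.toNat - 32) else c)
     else
       (if 65 ≤ c.toNat ∧ c.toNat ≤ 90 then Char.ofNat (c.toNat + 32) else c)) :: jadenGo c rest

def solution_alt (s : String) : String := String.ofList (jadenGo ' ' s.toList)

-- ===== PRECONDITION & SPEC =====
def Spec_solution (s : String) (out : String) : Prop := out = solution_alt s
instance (s : String) (out : String) : Decidable (Spec_solution s out) := by unfold Spec_solution; infer_instance

-- ===== CLAIM (what is proved, stated in full; the proofs are below) =====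
def Claim_equal_solution : Prop := ∀ (s : String), Dom_solution s → Spec_solution s (solution s)

-- ===== LEMMAS AND PROOFS =====

def capF (c : Char) : Char :=
  if 97 ≤ c.toNat ∧ c.toNat ≤ 122 then Char.ofNat (c.toNat - 32) else c
def capR (c : Char) : Char :=
  if 65 ≤ c.toNat ∧ c.toNat ≤ 90 then Char.ofNat (c.toNat + 32) else c

-- simple split on a single space, as a (first word, later words) pair
def mySplit : List Char → List Char × List (List Char)
  | [] => ([], [])
  | c :: r =>
    let p := mySplit r
    if c = ' ' then ([], p.1 :: p.2) else (c :: p.1, p.2)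

theorem mapIdx_shift (w : List Char) (g : ℕ → Char → Char)
    (h : ∀ i c, g i c = capR c) : w.mapIdx g = w.map capR := by
  induction w generalizing g with
  | nil => rfl
  | cons c r ih =>
      rw [List.mapIdx_cons, h, ih (fun i c => g (i + 1) c) (fun i c => h (i + 1) c)]
      rfl

theorem capWordA_eq (w : List Char) :
    capWordA w = match w with
      | [] => []
      | c :: r => capF c :: r.map capR := by
  cases w with
  | nil => rfl
  | cons c r =>
      simp only [capWordA, List.mapIdx_cons]
      refine congrArg₂ _ rfl ?_
      exact mapIdx_shift r _ (fun i c => by simp [capR])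

theorem go_spec (l : List Char) : ∀ (fuel : ℕ) (cur : List Char) (acc : List (List Char)),
    l.length < fuel →
    PySem.Chars.splitOn.go [' '] fuel l cur acc
      = acc.reverse ++ ((cur.reverse ++ (mySplit l).1) :: (mySplit l).2) := by
  induction l with
  | nil =>
      intro fuel cur acc h
      match fuel, h with
      | fuel + 1, _ => simp [PySem.Chars.splitOn.go, mySplit]
  | cons c r ih =>
      intro fuel cur acc h
      match fuel, h with
      | fuel + 1, h =>
        by_cases hc : c = ' '
        · subst hc
          rw [show PySem.Chars.splitOn.go [' '] (fuel + 1) (' ' :: r) cur acc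
              = PySem.Chars.splitOn.go [' '] fuel r [] (cur.reverse :: acc) by
                simp [PySem.Chars.splitOn.go, List.isPrefixOf]]
          rw [ih fuel [] (cur.reverse :: acc) (by simpa using h)]
          simp [mySplit]
        · rw [show PySem.Chars.splitOn.go [' '] (fuel + 1) (c :: r) cur acc
              = PySem.Chars.splitOn.go [' '] fuel r (c :: cur) acc by
                simp [PySem.Chars.splitOn.go, List.isPrefixOf, Ne.symm hc]]
          rw [ih fuel (c :: cur) acc (by simpa using h)]
          simp [mySplit, hc]

theorem splitOn_eq (l : List Char) :
    PySem.Chars.splitOn l [' '] = (mySplit l).1 :: (mySplit l).2 := by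
  rw [PySem.Chars.splitOn, go_spec l (l.length + 1) [] [] (by omega)]
  simp

theorem join_cons (x : List Char) (xs : List (List Char)) :
    PySem.Chars.join [' '] (x :: xs) = x ++ xs.flatMap (fun w => ' ' :: w) := by
  induction xs generalizing x with
  | nil => simp [PySem.Chars.join_singleton]
  | cons y ys ih => rw [PySem.Chars.join_cons_cons, ih y]; simp

theorem jadenGo_spec (l : List Char) : ∀ (prev : Char),
    jadenGo prev l
      = (if prev = ' ' then capWordA (mySplit l).1 else (mySplit l).1.map capR)
        ++ (mySplit l).2.flatMap (fun w => ' ' :: capWordA w) := by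
  induction l with
  | nil =>
      intro prev
      simp only [jadenGo, mySplit, capWordA, List.mapIdx_nil, List.map_nil, List.flatMap_nil,
        List.append_nil, ite_self]
  | cons c r ih =>
      intro prev
      by_cases hc : c = ' '
      · subst hc
        have h1 : jadenGo prev (' ' :: r) = ' ' :: jadenGo ' ' r := by
          show (if prev = ' ' then _ else _) :: _ = _
          congr 1
          split <;> simp
        have h2 : mySplit (' ' :: r) = ([], (mySplit r).1 :: (mySplit r).2) := by
          simp [mySplit]
        rw [h1, ih ' ', h2, if_pos rfl]
        split <;> simp [capWordA]
      · have h1 : jadenGo prev (c :: r)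
            = (if prev = ' ' then capF c else capR c) :: jadenGo c r := by
          simp [jadenGo, capF, capR]
        have h2 : mySplit (c :: r) = (c :: (mySplit r).1, (mySplit r).2) := by
          simp [mySplit, hc]
        rw [h1, ih c, if_neg hc, h2]
        rw [capWordA_eq]
        split <;> simp [List.map]

theorem solution_eq_alt (s : String) : solution s = solution_alt s := by
  unfold solution solution_alt
  rw [splitOn_eq, List.map_cons, join_cons, jadenGo_spec s.toList ' ', if_pos rfl]
  congr 1
  simp [List.flatMap, Function.comp_def]

-- ===== VERDICT (by name: the statement is the Claim_ definition above) =====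
theorem solution_spec : Claim_equal_solution := by
  intro s _
  unfold Spec_solution
  exact solution_eq_alt s
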